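-- pv_equiv track=rewrite | github.com/bravetto/AbeOne_Master | guards/trust-guard/tests/ci_cd_test_reporter.py | _analyze_log_content
-- ===== SOURCE A (Python) =====
-- from typing import Dict, Any, List, Optional
--
-- def _analyze_log_content(log_content: str) -> Dict[str, Any]:
--     """Analyze log content for patterns and metrics."""
--     analysis = {
--         "total_lines": len(log_content.split('\n')),
--         "error_count": 0,
--         "warning_count": 0,
--         "info_count": 0,
--         "performance_entries": 0,
--         "security_events": 0
--     }
--
--     lines = log_content.split('\n')
--
--     for line in lines:
--         line_lower = line.lower()
--
--         if 'error' in line_lower: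
--             analysis["error_count"] += 1
--         elif 'warning' in line_lower or 'warn' in line_lower:
--             analysis["warning_count"] += 1
--         elif 'info' in line_lower:
--             analysis["info_count"] += 1
--
--         if 'performance' in line_lower or 'duration' in line_lower:
--             analysis["performance_entries"] += 1
--
--         if 'security' in line_lower or 'auth' in line_lower:
--             analysis["security_events"] += 1
--
--     return analysis
-- ===== SOURCE B (Python) =====
-- def _analyze_log_content(log_content: str) -> dict:
--     """Analyze log content for patterns and metrics."""
--     lows = [line.lower() for line in log_content.split('\n')]
--     is_err = lambda l: 'error' in l
--     is_warn = lambda l: ('warning' in l or 'warn' in l) and 'error' not in l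
--     is_info = lambda l: 'info' in l and 'error' not in l and 'warning' not in l and 'warn' not in l
--     return {
--         "total_lines": len(lows),
--         "error_count": sum(1 for l in lows if is_err(l)),
--         "warning_count": sum(1 for l in lows if is_warn(l)),
--         "info_count": sum(1 for l in lows if is_info(l)),
--         "performance_entries": sum(1 for l in lows if 'performance' in l or 'duration' in l),
--         "security_events": sum(1 for l in lows if 'security' in l or 'auth' in l),
--     }
-- ===== Notes on version B (the rewrite author's own statement) =====
-- stated objective: simpler
-- what changed: Replaces A's single stateful loop that mutates a counter dict with an up-front lowercase pass plus one independent countP-style aggregation per metric, encoding the error>warn>info elif priority as explicit exclusion predicates.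
import Mathlib
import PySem

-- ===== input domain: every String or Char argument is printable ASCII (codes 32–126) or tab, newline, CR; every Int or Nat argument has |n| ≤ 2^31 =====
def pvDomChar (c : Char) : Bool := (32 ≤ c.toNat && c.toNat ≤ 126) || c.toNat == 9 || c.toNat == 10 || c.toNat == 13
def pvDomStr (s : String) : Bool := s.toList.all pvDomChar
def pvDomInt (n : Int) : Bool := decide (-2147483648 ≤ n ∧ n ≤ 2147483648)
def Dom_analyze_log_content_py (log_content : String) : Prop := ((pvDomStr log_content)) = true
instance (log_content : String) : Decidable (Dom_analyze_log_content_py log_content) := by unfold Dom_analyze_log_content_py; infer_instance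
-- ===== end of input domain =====

-- B replaces A's single stateful loop over a counter dict by independent countP passes over
-- the lowercased lines, encoding the elif priority as explicit exclusion; objective: simpler.

-- ===== PORT A =====
-- the loop body of A (one line, updating the counter dict)
def pvStepA (analysis : PySem.Dict String Int) (line : String) : PySem.Dict String Int :=
  let line_lower := PySem.Str.lower line
  let analysis :=
    if PySem.Str.isIn "error" line_lower then analysis.modify "error_count" 0 (· + 1)
    else if PySem.Str.isIn "warning" line_lower || PySem.Str.isIn "warn" line_lower then
      analysis.modify "warning_count" 0 (· + 1)
    else if PySem.Str.isIn "info" line_lower then analysis.modify "info_count" 0 (· + 1)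
    else analysis
  let analysis :=
    if PySem.Str.isIn "performance" line_lower || PySem.Str.isIn "duration" line_lower then
      analysis.modify "performance_entries" 0 (· + 1)
    else analysis
  if PySem.Str.isIn "security" line_lower || PySem.Str.isIn "auth" line_lower then
    analysis.modify "security_events" 0 (· + 1)
  else analysis

def analyze_log_content_py (log_content : String) : List (String × Int) :=
  let analysis : PySem.Dict String Int := PySem.Dict.ofList
    [("total_lines", (((PySem.Str.split? log_content "\n").getD []).length : Int)),
     ("error_count", 0), ("warning_count", 0), ("info_count", 0),
     ("performance_entries", 0), ("security_events", 0)]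
  let lines := (PySem.Str.split? log_content "\n").getD []
  (lines.foldl pvStepA analysis).items

-- ===== PORT B =====
def pvIsErr (l : String) : Bool := PySem.Str.isIn "error" l
def pvIsWarn (l : String) : Bool :=
  (PySem.Str.isIn "warning" l || PySem.Str.isIn "warn" l) && !PySem.Str.isIn "error" l
def pvIsInfo (l : String) : Bool :=
  PySem.Str.isIn "info" l && !PySem.Str.isIn "error" l
    && !PySem.Str.isIn "warning" l && !PySem.Str.isIn "warn" l

def analyze_log_content_py_alt (log_content : String) : List (String × Int) :=
  let lows := ((PySem.Str.split? log_content "\n").getD []).map PySem.Str.lower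
  [("total_lines", (lows.length : Int)),
   ("error_count", (lows.countP pvIsErr : Int)),
   ("warning_count", (lows.countP pvIsWarn : Int)),
   ("info_count", (lows.countP pvIsInfo : Int)),
   ("performance_entries", (lows.countP (fun l => PySem.Str.isIn "performance" l || PySem.Str.isIn "duration" l) : Int)),
   ("security_events", (lows.countP (fun l => PySem.Str.isIn "security" l || PySem.Str.isIn "auth" l) : Int))]

-- ===== PRECONDITION & SPEC =====
def Spec_analyze_log_content_py (log_content : String) (out : List (String × Int)) : Prop := out = analyze_log_content_py_alt log_content
instance (log_content : String) (out : List (String × Int)) : Decidable (Spec_analyze_log_content_py log_content out) := by unfold Spec_analyze_log_content_py; infer_instance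

-- ===== CLAIM (what is proved, stated in full; the proofs are below) =====
def Claim_equal_analyze_log_content_py : Prop := ∀ (log_content : String), Dom_analyze_log_content_py log_content → Spec_analyze_log_content_py log_content (analyze_log_content_py log_content)

-- ===== LEMMAS AND PROOFS =====
-- a literal 6-key counter dict, the only shape A's loop state ever has
def pvDictOf (t e w i p s : Int) : PySem.Dict String Int :=
  PySem.Dict.mk [("total_lines", t), ("error_count", e), ("warning_count", w),
                 ("info_count", i), ("performance_entries", p), ("security_events", s)]

-- one step of A's loop, in closed form (increments shaped like A's if/elif chain)
lemma pvStepA_closed (t e w i p s : Int) (line : String) :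
    pvStepA (pvDictOf t e w i p s) line =
      pvDictOf t
        (e + if PySem.Str.isIn "error" (PySem.Str.lower line) then 1 else 0)
        (w + if PySem.Str.isIn "error" (PySem.Str.lower line) then 0
             else if PySem.Str.isIn "warning" (PySem.Str.lower line) || PySem.Str.isIn "warn" (PySem.Str.lower line) then 1 else 0)
        (i + if PySem.Str.isIn "error" (PySem.Str.lower line) then 0
             else if PySem.Str.isIn "warning" (PySem.Str.lower line) || PySem.Str.isIn "warn" (PySem.Str.lower line) then 0
             else if PySem.Str.isIn "info" (PySem.Str.lower line) then 1 else 0)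
        (p + if PySem.Str.isIn "performance" (PySem.Str.lower line) || PySem.Str.isIn "duration" (PySem.Str.lower line) then 1 else 0)
        (s + if PySem.Str.isIn "security" (PySem.Str.lower line) || PySem.Str.isIn "auth" (PySem.Str.lower line) then 1 else 0) := by
  simp only [pvStepA]
  split_ifs <;> simp only [add_zero] <;> rfl

-- the elif increments agree with B's exclusion predicates, line by line
lemma pvWarnIf (l : String) :
    (if PySem.Str.isIn "error" l then (0 : Int)
     else if PySem.Str.isIn "warning" l || PySem.Str.isIn "warn" l then 1 else 0) =
      if pvIsWarn l then 1 else 0 := by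
  unfold pvIsWarn
  cases PySem.Str.isIn "error" l <;> cases PySem.Str.isIn "warning" l <;> cases PySem.Str.isIn "warn" l <;> simp

lemma pvInfoIf (l : String) :
    (if PySem.Str.isIn "error" l then (0 : Int)
     else if PySem.Str.isIn "warning" l || PySem.Str.isIn "warn" l then 0
     else if PySem.Str.isIn "info" l then 1 else 0) =
      if pvIsInfo l then 1 else 0 := by
  unfold pvIsInfo
  cases PySem.Str.isIn "error" l <;> cases PySem.Str.isIn "warning" l <;>
    cases PySem.Str.isIn "warn" l <;> cases PySem.Str.isIn "info" l <;> simp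

lemma pvLoop (lines : List String) (t e w i p s : Int) :
    lines.foldl pvStepA (pvDictOf t e w i p s) =
      pvDictOf t
        (e + ((lines.map PySem.Str.lower).countP pvIsErr : Int))
        (w + ((lines.map PySem.Str.lower).countP pvIsWarn : Int))
        (i + ((lines.map PySem.Str.lower).countP pvIsInfo : Int))
        (p + ((lines.map PySem.Str.lower).countP (fun l => PySem.Str.isIn "performance" l || PySem.Str.isIn "duration" l) : Int))
        (s + ((lines.map PySem.Str.lower).countP (fun l => PySem.Str.isIn "security" l || PySem.Str.isIn "auth" l) : Int)) := by
  induction lines generalizing e w i p s with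
  | nil => simp
  | cons hd tl ih =>
    rw [List.foldl_cons, pvStepA_closed, pvWarnIf, pvInfoIf, ih]
    simp only [List.map_cons, List.countP_cons, pvDictOf, PySem.Dict.mk.injEq, List.cons.injEq,
      Prod.mk.injEq, and_true, true_and, pvIsErr]
    refine ⟨?_, ?_, ?_, ?_, ?_⟩ <;> split_ifs <;> push_cast <;> ring

-- ===== VERDICT (by name: the statement is the Claim_ definition above) =====
theorem analyze_log_content_py_spec : Claim_equal_analyze_log_content_py := by
  intro log_content _
  unfold Spec_analyze_log_content_py analyze_log_content_py analyze_log_content_py_alt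
  have hinit : PySem.Dict.ofList
      [("total_lines", (((PySem.Str.split? log_content "\n").getD []).length : Int)),
       ("error_count", 0), ("warning_count", 0), ("info_count", 0),
       ("performance_entries", 0), ("security_events", 0)] =
      pvDictOf (((PySem.Str.split? log_content "\n").getD []).length : Int) 0 0 0 0 0 := by rfl
  simp only [hinit]
  simp only [pvLoop]
  simp [pvDictOf]
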